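-- pv_equiv track=rewrite | github.com/integritystudio/dev-env-analyzer | arc-fix/doppler_migration/migrate-to-doppler.py | is_auth_variable
-- ===== SOURCE A (Python) =====
-- def is_auth_variable(key: str) -> bool:
--     """Check if variable is authentication-related"""
--     auth_patterns = [
--         'API_KEY', 'CLIENT_ID', 'CLIENT_SECRET', 'HUBSPOT',
--         'PUBLIC_KEY', 'PRIVATE_KEY', 'TOKEN', 'PASSWORD',
--         'SECRET', 'CREDENTIALS', 'AUTH'
--     ]
--
--     key_upper = key.upper()
--     return any(pattern in key_upper for pattern in auth_patterns)
-- ===== SOURCE B (Python) =====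
-- _AUTH_PATTERNS = [
--     'API_KEY', 'CLIENT_ID', 'CLIENT_SECRET', 'HUBSPOT',
--     'PUBLIC_KEY', 'PRIVATE_KEY', 'TOKEN', 'PASSWORD',
--     'SECRET', 'CREDENTIALS', 'AUTH'
-- ]
--
--
-- def is_auth_variable(key: str) -> bool:
--     """Check if variable is authentication-related"""
--     s = key
--     while s:
--         for p in _AUTH_PATTERNS:
--             if s[:len(p)].upper() == p:
--                 return True
--         s = s[1:]
--     return False
-- ===== Notes on version B (the rewrite author's own statement) =====
-- stated objective: alternative
-- what changed: Instead of uppercasing the whole key and asking whether any pattern occurs as a substring of that copy, B slides a window over the original key and compares the uppercased window prefix against each pattern at each position, so no uppercased copy and no library substring search is used.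
import Mathlib
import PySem

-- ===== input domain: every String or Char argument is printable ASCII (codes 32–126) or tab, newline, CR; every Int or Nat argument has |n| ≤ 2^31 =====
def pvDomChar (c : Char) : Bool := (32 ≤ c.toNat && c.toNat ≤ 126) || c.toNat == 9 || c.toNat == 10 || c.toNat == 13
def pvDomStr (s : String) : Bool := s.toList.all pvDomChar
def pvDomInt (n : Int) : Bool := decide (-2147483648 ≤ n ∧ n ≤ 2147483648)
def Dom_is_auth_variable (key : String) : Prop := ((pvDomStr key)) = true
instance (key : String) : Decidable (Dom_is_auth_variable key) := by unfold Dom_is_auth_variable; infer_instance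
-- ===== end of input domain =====

-- B replaces A's "uppercase the whole key, then any(pattern in key_upper)" by a single
-- sliding-window scan comparing the uppercased window prefix against each pattern (alternative
-- decomposition, same asymptotic cost).

-- ===== PORT A =====
def authPatterns_A : List String :=
  ["API_KEY", "CLIENT_ID", "CLIENT_SECRET", "HUBSPOT",
   "PUBLIC_KEY", "PRIVATE_KEY", "TOKEN", "PASSWORD",
   "SECRET", "CREDENTIALS", "AUTH"]

def is_auth_variable (key : String) : Bool :=
  let key_upper := PySem.Str.upper key
  authPatterns_A.any (fun pattern => PySem.Str.isIn pattern key_upper)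

-- ===== PORT B =====
def authPatterns_B : List String :=
  ["API_KEY", "CLIENT_ID", "CLIENT_SECRET", "HUBSPOT",
   "PUBLIC_KEY", "PRIVATE_KEY", "TOKEN", "PASSWORD",
   "SECRET", "CREDENTIALS", "AUTH"]

-- 'while s: … s = s[1:]' is the structural recursion on the char list; 's[:len(p)]' with a
-- nonnegative bound is exactly 'List.take' of the pattern's length.
def scanAuth (s : List Char) : Bool :=
  match s with
  | [] => false
  | _ :: t =>
      if authPatterns_B.any (fun p => PySem.Chars.upper (s.take p.toList.length) == p.toList)
      then true
      else scanAuth t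

def is_auth_variable_alt (key : String) : Bool := scanAuth key.toList

-- ===== PRECONDITION & SPEC =====
def Spec_is_auth_variable (key : String) (out : Bool) : Prop := out = is_auth_variable_alt key
instance (key : String) (out : Bool) : Decidable (Spec_is_auth_variable key out) := by unfold Spec_is_auth_variable; infer_instance

-- ===== CLAIM (what is proved, stated in full; the proofs are below) =====
def Claim_equal_is_auth_variable : Prop := ∀ (key : String), Dom_is_auth_variable key → Spec_is_auth_variable key (is_auth_variable key)

-- ===== LEMMAS AND PROOFS =====

-- B's window test at the head position equals "p is a prefix of the uppercased string".
theorem window_eq_prefix (p : String) (s : List Char) :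
    (PySem.Chars.upper (s.take p.toList.length) == p.toList)
      = decide (p.toList <+: PySem.Chars.upper s) := by
  rw [Bool.eq_iff_iff]
  simp only [beq_iff_eq, decide_eq_true_iff, PySem.Chars.upper, List.map_take]
  rw [List.prefix_iff_eq_take]
  exact eq_comm

-- Python's 'sub in s' unfolded one character: prefix match here, or a match further right.
theorem isIn_cons (p : List Char) (x : Char) (u : List Char) :
    PySem.Chars.isIn p (x :: u) = (decide (p <+: x :: u) || PySem.Chars.isIn p u) := by
  rw [Bool.eq_iff_iff]
  simp only [Bool.or_eq_true, decide_eq_true_iff, PySem.Chars.isIn_iff_infix, List.infix_cons_iff]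

theorem any_or_distrib (pats : List String) (f g : String → Bool) :
    pats.any (fun p => f p || g p) = (pats.any f || pats.any g) := by
  rw [Bool.eq_iff_iff]
  simp only [List.any_eq_true, Bool.or_eq_true]
  constructor
  · rintro ⟨p, hp, h | h⟩
    · exact Or.inl ⟨p, hp, h⟩
    · exact Or.inr ⟨p, hp, h⟩
  · rintro (⟨p, hp, h⟩ | ⟨p, hp, h⟩)
    · exact ⟨p, hp, Or.inl h⟩
    · exact ⟨p, hp, Or.inr h⟩

-- The main invariant: B's scan computes A's "any pattern in uppercased string".
theorem scanAuth_eq (cs : List Char) :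
    scanAuth cs = authPatterns_A.any (fun p => PySem.Chars.isIn p.toList (PySem.Chars.upper cs)) := by
  induction cs with
  | nil => decide
  | cons c t ih =>
      rw [scanAuth]
      have hB : authPatterns_B = authPatterns_A := by decide
      have hup : PySem.Chars.upper (c :: t) = PySem.Chars.upperChar c :: PySem.Chars.upper t := by
        simp [PySem.Chars.upper]
      calc (if authPatterns_B.any
                (fun p => PySem.Chars.upper ((c :: t).take p.toList.length) == p.toList)
            then true else scanAuth t)
          = (authPatterns_A.any
                (fun p => decide (p.toList <+: PySem.Chars.upper (c :: t)))
              || scanAuth t) := by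
            rw [hB, List.any_congr rfl (fun p => window_eq_prefix p (c :: t))]
            cases authPatterns_A.any
                (fun p => decide (p.toList <+: PySem.Chars.upper (c :: t))) <;> simp
        _ = authPatterns_A.any
              (fun p => PySem.Chars.isIn p.toList (PySem.Chars.upper (c :: t))) := by
            rw [ih, ← any_or_distrib]
            refine (List.any_congr rfl (fun p => ?_)).symm
            rw [hup, isIn_cons, ← hup]

theorem is_auth_variable_eq (key : String) : is_auth_variable key = is_auth_variable_alt key := by
  unfold is_auth_variable is_auth_variable_alt
  rw [scanAuth_eq]
  exact (List.any_congr rfl (fun p => by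
    rw [Bool.eq_iff_iff]
    simp only [PySem.Str.isIn_iff_infix, PySem.Chars.isIn_iff_infix, PySem.Str.toList_upper])).symm

-- ===== VERDICT (by name: the statement is the Claim_ definition above) =====
theorem is_auth_variable_spec : Claim_equal_is_auth_variable := by
  intro key _
  unfold Spec_is_auth_variable
  exact is_auth_variable_eq key
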